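-- pv_equiv track=rewrite | github.com/aecelaya/MIST | tests/analyze_data/test_analyzer_utils.py | _make_strides
-- ===== SOURCE A (Python) =====
-- def _make_strides(z_divisor: int, low_res_axis: int) -> list:
--     """Build a minimal strides list that yields the desired z_divisor.
--
--     strides[0] is always [1,1,1] (the input block that the function skips).
--     Subsequent entries each contribute a factor-of-2 stride on the low-res
--     axis until the cumulative product equals z_divisor.
--     """
--     strides = [[1, 1, 1]]
--     remaining = z_divisor
--     while remaining > 1:
--         factor = 2 if remaining % 2 == 0 else remaining
--         s = [1, 1, 1]
--         s[low_res_axis] = factor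
--         strides.append(s)
--         remaining //= factor
--     return strides
-- ===== SOURCE B (Python) =====
-- def _make_strides(z_divisor: int, low_res_axis: int) -> list:
--     """Closed form: the 2-adic valuation comes from the lowest-set-bit trick
--     (z & -z).bit_length() - 1 instead of any loop over factors; the strides are
--     then built directly by comprehension on a modulo-normalised axis."""
--     if z_divisor <= 1:
--         return [[1, 1, 1]]
--     axis = low_res_axis % 3
--     count = (z_divisor & -z_divisor).bit_length() - 1
--     odd = z_divisor >> count
--     factors = [2] * count + ([odd] if odd > 1 else [])
--     return [[1, 1, 1]] + [[f if j == axis else 1 for j in range(3)]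
--                           for f in factors]
-- ===== Notes on version B (the rewrite author's own statement) =====
-- stated objective: alternative
-- what changed: Replaces A's while-loop that repeatedly divides z_divisor and mutates a stride per iteration with a loop-free closed form: the 2-adic valuation is read off in O(1) big-int ops via the lowest-set-bit trick (z & -z).bit_length() - 1, the odd part via a single shift, and the strides are built by a comprehension on a modulo-normalised axis instead of item assignment.
import Mathlib
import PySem

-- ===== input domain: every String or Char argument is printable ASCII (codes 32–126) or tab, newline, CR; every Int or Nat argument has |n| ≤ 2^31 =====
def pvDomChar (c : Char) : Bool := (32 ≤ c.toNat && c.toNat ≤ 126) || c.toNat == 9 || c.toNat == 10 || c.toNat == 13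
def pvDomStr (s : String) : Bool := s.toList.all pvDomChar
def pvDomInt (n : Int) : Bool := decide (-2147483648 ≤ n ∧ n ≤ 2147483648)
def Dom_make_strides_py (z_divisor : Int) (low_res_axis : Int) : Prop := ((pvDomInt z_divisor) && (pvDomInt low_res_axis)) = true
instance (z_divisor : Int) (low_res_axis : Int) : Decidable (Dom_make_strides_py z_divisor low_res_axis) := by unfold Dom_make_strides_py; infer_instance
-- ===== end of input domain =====

-- B replaces A's divide-by-2 while-loop with a loop-free closed form: the 2-adic valuation
-- via the lowest-set-bit trick (z & -z).bit_length() - 1, the odd part via one shift, and a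
-- comprehension build on a modulo-normalised axis; alternative algorithm, same overall cost.

-- ===== PORT A =====
-- A's loop body: 's = [1,1,1]; s[low_res_axis] = factor' — pySetD is exact Python item
-- assignment under Pre_ (index in range); out of range Python raises IndexError (excluded by Pre_).
def pvMkStride (low_res_axis f : Int) : List Int :=
  PySem.List.pySetD [1, 1, 1] low_res_axis f

def pvLoopA (low_res_axis remaining : Int) (acc : List (List Int)) : List (List Int) :=
  if remaining > 1 then
    let factor : Int := if PySem.Int.mod remaining 2 = 0 then 2 else remaining
    pvLoopA low_res_axis (PySem.Int.floordiv remaining factor) (acc ++ [pvMkStride low_res_axis factor])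
  else acc
termination_by remaining.toNat
decreasing_by
  split_ifs with h2
  · rw [PySem.Int.floordiv_eq_ediv_of_pos (by omega : (0:Int) < 2)]; omega
  · rw [PySem.Int.floordiv_eq_ediv_of_pos (by omega : (0:Int) < remaining)]
    have : remaining / remaining = 1 := Int.ediv_self (by omega)
    omega

def make_strides_py (z_divisor : Int) (low_res_axis : Int) : List (List Int) :=
  pvLoopA low_res_axis z_divisor [[1, 1, 1]]

-- ===== PORT B =====
-- B's comprehension '[f if j == axis else 1 for j in range(3)]'
def pvMkAlt (axis f : Int) : List Int :=
  (PySem.List.pyRange 0 3 1).map (fun j => if j = axis then f else 1)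

def make_strides_py_alt (z_divisor : Int) (low_res_axis : Int) : List (List Int) :=
  if z_divisor ≤ 1 then [[1, 1, 1]]
  else
    let axis := PySem.Int.mod low_res_axis 3
    -- (z & -z).bit_length() - 1 : PySem.Int.band / bitLength are Python-exact
    let count := PySem.Int.bitLength (PySem.Int.band z_divisor (-z_divisor)) - 1
    let odd := z_divisor >>> count   -- Python's z >> count is Lean's >>> on Int
    let factors := List.replicate count (2 : Int) ++ (if odd > 1 then [odd] else [])
    [[1, 1, 1]] ++ factors.map (fun f => pvMkAlt axis f)

-- ===== PRECONDITION & SPEC =====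
-- Pre_ excludes exactly the inputs where Python A raises IndexError: z_divisor > 1 with
-- low_res_axis outside [-3, 2].
def Pre_make_strides_py (z_divisor : Int) (low_res_axis : Int) : Prop :=
  z_divisor ≤ 1 ∨ (-3 ≤ low_res_axis ∧ low_res_axis < 3)
instance (z_divisor : Int) (low_res_axis : Int) : Decidable (Pre_make_strides_py z_divisor low_res_axis) := by unfold Pre_make_strides_py; infer_instance

def pvWitness_make_strides_py : Int × Int := (12, 0)

def Spec_make_strides_py (z_divisor : Int) (low_res_axis : Int) (out : List (List Int)) : Prop := out = make_strides_py_alt z_divisor low_res_axis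
instance (z_divisor : Int) (low_res_axis : Int) (out : List (List Int)) : Decidable (Spec_make_strides_py z_divisor low_res_axis out) := by unfold Spec_make_strides_py; infer_instance

-- ===== CLAIM (what is proved, stated in full; the proofs are below) =====
def Claim_equal_make_strides_py : Prop := ∀ (z_divisor : Int) (low_res_axis : Int), Dom_make_strides_py z_divisor low_res_axis → Pre_make_strides_py z_divisor low_res_axis → Spec_make_strides_py z_divisor low_res_axis (make_strides_py z_divisor low_res_axis)

-- ===== LEMMAS AND PROOFS =====

-- proof-side recursion characterising A's loop: strip factors of two, return (count, remainder)
def pvCountTwos (remaining count : Int) : Int × Int :=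
  if remaining > 1 ∧ PySem.Int.mod remaining 2 = 0 then
    pvCountTwos (PySem.Int.floordiv remaining 2) (count + 1)
  else (count, remaining)
termination_by remaining.toNat
decreasing_by
  rw [PySem.Int.floordiv_eq_ediv_of_pos (by omega : (0:Int) < 2)]; omega

-- A's loop appends to its accumulator only.
theorem pvLoopA_acc (low_res_axis : Int) :
    ∀ (n : Nat) (r : Int), r.toNat ≤ n → ∀ acc,
      pvLoopA low_res_axis r acc = acc ++ pvLoopA low_res_axis r [] := by
  intro n
  induction n with
  | zero =>
    intro r hr acc
    have h : ¬ r > 1 := by omega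
    rw [pvLoopA.eq_def low_res_axis r acc, if_neg h,
        pvLoopA.eq_def low_res_axis r [], if_neg h, List.append_nil]
  | succ n ih =>
    intro r hr acc
    by_cases h : r > 1
    · rw [pvLoopA.eq_def low_res_axis r acc, if_pos h,
          pvLoopA.eq_def low_res_axis r [], if_pos h]
      set f : Int := if PySem.Int.mod r 2 = 0 then 2 else r with hf
      have hlt : (PySem.Int.floordiv r f).toNat ≤ n := by
        rw [hf]; split_ifs with h2
        · rw [PySem.Int.floordiv_eq_ediv_of_pos (by omega : (0:Int) < 2)]; omega
        · rw [PySem.Int.floordiv_eq_ediv_of_pos (by omega : (0:Int) < r)]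
          have : r / r = 1 := Int.ediv_self (by omega)
          omega
      rw [ih _ hlt (acc ++ [pvMkStride low_res_axis f]),
          ih _ hlt ([] ++ [pvMkStride low_res_axis f])]
      simp
    · rw [pvLoopA.eq_def low_res_axis r acc, if_neg h,
          pvLoopA.eq_def low_res_axis r [], if_neg h, List.append_nil]

-- the accumulator of pvCountTwos only shifts the count.
theorem pvCountTwos_shift :
    ∀ (n : Nat) (r : Int), r.toNat ≤ n → ∀ c,
      pvCountTwos r c = (c + (pvCountTwos r 0).1, (pvCountTwos r 0).2) := by
  intro n
  induction n with
  | zero =>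
    intro r hr c
    have h : ¬ (r > 1 ∧ PySem.Int.mod r 2 = 0) := by rintro ⟨h1, _⟩; omega
    rw [pvCountTwos.eq_def r c, if_neg h, pvCountTwos.eq_def r 0, if_neg h]
    simp only [Prod.mk.injEq]
    exact ⟨by ring, trivial⟩
  | succ n ih =>
    intro r hr c
    by_cases h : r > 1 ∧ PySem.Int.mod r 2 = 0
    · rw [pvCountTwos.eq_def r c, if_pos h, pvCountTwos.eq_def r 0, if_pos h]
      have hlt : (PySem.Int.floordiv r 2).toNat ≤ n := by
        rw [PySem.Int.floordiv_eq_ediv_of_pos (by omega : (0:Int) < 2)]; omega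
      rw [ih _ hlt (c + 1), ih _ hlt (0 + 1)]
      simp only [Prod.mk.injEq]
      exact ⟨by ring, trivial⟩
    · rw [pvCountTwos.eq_def r c, if_neg h, pvCountTwos.eq_def r 0, if_neg h]
      simp

theorem pvCountTwos_nonneg :
    ∀ (n : Nat) (r : Int), r.toNat ≤ n → 0 ≤ (pvCountTwos r 0).1 := by
  intro n
  induction n with
  | zero =>
    intro r hr
    have h : ¬ (r > 1 ∧ PySem.Int.mod r 2 = 0) := by rintro ⟨h1, _⟩; omega
    rw [pvCountTwos.eq_def r 0, if_neg h]
  | succ n ih =>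
    intro r hr
    by_cases h : r > 1 ∧ PySem.Int.mod r 2 = 0
    · rw [pvCountTwos.eq_def r 0, if_pos h]
      have hlt : (PySem.Int.floordiv r 2).toNat ≤ n := by
        rw [PySem.Int.floordiv_eq_ediv_of_pos (by omega : (0:Int) < 2)]; omega
      rw [pvCountTwos_shift n _ hlt (0 + 1)]
      have := ih _ hlt
      dsimp only
      omega
    · rw [pvCountTwos.eq_def r 0, if_neg h]

-- characterisation of A's emitted tail in terms of the counting recursion.
theorem pvEmit_eq (low_res_axis : Int) :
    ∀ (n : Nat) (r : Int), r.toNat ≤ n →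
      pvLoopA low_res_axis r [] =
        List.replicate (pvCountTwos r 0).1.toNat (pvMkStride low_res_axis 2) ++
          (if (pvCountTwos r 0).2 > 1 then [pvMkStride low_res_axis (pvCountTwos r 0).2] else []) := by
  intro n
  induction n with
  | zero =>
    intro r hr
    have h : ¬ r > 1 := by omega
    have h' : ¬ (r > 1 ∧ PySem.Int.mod r 2 = 0) := by rintro ⟨h1, _⟩; omega
    rw [pvLoopA.eq_def low_res_axis r [], if_neg h, pvCountTwos.eq_def r 0, if_neg h']
    simp [h]
  | succ n ih =>
    intro r hr
    by_cases h : r > 1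
    · by_cases h2 : PySem.Int.mod r 2 = 0
      · have hand : r > 1 ∧ PySem.Int.mod r 2 = 0 := ⟨h, h2⟩
        have hlt : (PySem.Int.floordiv r 2).toNat ≤ n := by
          rw [PySem.Int.floordiv_eq_ediv_of_pos (by omega : (0:Int) < 2)]; omega
        rw [pvLoopA.eq_def low_res_axis r [], if_pos h]
        simp only [h2, if_true]
        rw [pvLoopA_acc low_res_axis n _ hlt, ih _ hlt,
            pvCountTwos.eq_def r 0, if_pos hand,
            pvCountTwos_shift n _ hlt (0 + 1)]
        have hc := pvCountTwos_nonneg n _ hlt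
        have hrep : (0 + 1 + (pvCountTwos (PySem.Int.floordiv r 2) 0).1).toNat
            = (pvCountTwos (PySem.Int.floordiv r 2) 0).1.toNat + 1 := by omega
        dsimp only
        rw [hrep, List.replicate_succ]
        simp
      · have h' : ¬ (r > 1 ∧ PySem.Int.mod r 2 = 0) := by rintro ⟨_, hm⟩; exact h2 hm
        rw [pvLoopA.eq_def low_res_axis r [], if_pos h,
            pvCountTwos.eq_def r 0, if_neg h']
        simp only [h2, if_false]
        have hdiv : PySem.Int.floordiv r r = 1 := by
          rw [PySem.Int.floordiv_eq_ediv_of_pos (by omega : (0:Int) < r)]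
          exact Int.ediv_self (by omega)
        rw [hdiv, pvLoopA.eq_def low_res_axis 1 _, if_neg (by omega : ¬ (1:Int) > 1)]
        simp [h]
    · have h' : ¬ (r > 1 ∧ PySem.Int.mod r 2 = 0) := by rintro ⟨h1, _⟩; exact h h1
      rw [pvLoopA.eq_def low_res_axis r [], if_neg h, pvCountTwos.eq_def r 0, if_neg h']
      simp [h]

-- lowest set bit: for odd n, n & (n-1) = n-1
theorem pvAnd_pred_odd (n : Nat) (h : n % 2 = 1) : n &&& (n - 1) = n - 1 := by
  apply Nat.eq_of_testBit_eq
  intro i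
  cases i with
  | zero =>
    have hf : (n - 1).testBit 0 = false := by
      simp only [Nat.testBit_zero, decide_eq_false_iff_not]
      omega
    rw [Nat.testBit_and, hf, Bool.and_false]
  | succ j =>
    rw [Nat.testBit_and]
    simp only [Nat.testBit_succ]
    have hq : n / 2 = (n - 1) / 2 := by omega
    rw [hq, Bool.and_self]

-- lowest set bit: for even 2m, (2m) & (2m-1) = 2 * (m & (m-1))
theorem pvAnd_pred_even (m : Nat) (h : 0 < m) :
    (2 * m) &&& (2 * m - 1) = 2 * (m &&& (m - 1)) := by
  apply Nat.eq_of_testBit_eq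
  intro i
  cases i with
  | zero =>
    have e1 : (2 * m).testBit 0 = false := by
      simp only [Nat.testBit_zero, decide_eq_false_iff_not]
      omega
    have e2 : (2 * (m &&& (m - 1))).testBit 0 = false := by
      simp only [Nat.testBit_zero, decide_eq_false_iff_not]
      omega
    rw [Nat.testBit_and, e1, e2, Bool.false_and]
  | succ j =>
    rw [Nat.testBit_and]
    simp only [Nat.testBit_succ]
    have h1 : 2 * m / 2 = m := by omega
    have h2 : (2 * m - 1) / 2 = m - 1 := by omega
    have h3 : 2 * (m &&& (m - 1)) / 2 = m &&& (m - 1) := by omega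
    rw [h1, h2, h3]
    exact (Nat.testBit_and _ _ _).symm

-- z & -z for positive z, in Nat terms
theorem pvBand_neg_self (z : Int) (h : 0 < z) :
    PySem.Int.band z (-z) = ((z.toNat - (z.toNat &&& (z.toNat - 1)) : Nat) : Int) := by
  unfold PySem.Int.band
  rw [if_pos (by omega : (0:Int) ≤ z), if_neg (by omega : ¬ (0:Int) ≤ -z)]
  have h1 : (-(-z) - 1).toNat = z.toNat - 1 := by omega
  rw [h1]

theorem pvBitLength_pos (m : Nat) (h : 0 < m) : 0 < PySem.Int.bitLength (m : Int) := by
  by_contra hb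
  have hlt := PySem.Int.lt_two_pow_bitLength (m : Int)
  simp only [Int.natAbs_natCast] at hlt
  have : PySem.Int.bitLength (m : Int) = 0 := by omega
  rw [this] at hlt
  simp at hlt
  omega

-- B's closed form equals the counting recursion, for all positive r
theorem pvClosed_eq :
    ∀ (n : Nat) (r : Int), 0 < r → r.toNat ≤ n →
      ((PySem.Int.bitLength (PySem.Int.band r (-r)) - 1 : Nat) = (pvCountTwos r 0).1.toNat)
      ∧ (r >>> (PySem.Int.bitLength (PySem.Int.band r (-r)) - 1) = (pvCountTwos r 0).2) := by
  intro n
  induction n with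
  | zero => intro r hr hn; omega
  | succ n ih =>
    intro r hr hn
    by_cases hodd : r.toNat % 2 = 1
    · -- r odd: z & -z = 1, count = 0, shift by 0
      have hband : PySem.Int.band r (-r) = ((1 : Nat) : Int) := by
        rw [pvBand_neg_self r hr, pvAnd_pred_odd r.toNat hodd]
        congr 1
        omega
      have hmod : PySem.Int.mod r 2 ≠ 0 := by
        rw [PySem.Int.mod_eq_emod_of_pos (by omega : (0:Int) < 2)]
        omega
      have hstop : ¬ (r > 1 ∧ PySem.Int.mod r 2 = 0) := by rintro ⟨_, hm⟩; exact hmod hm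
      rw [hband, pvCountTwos.eq_def r 0, if_neg hstop]
      have hbl : PySem.Int.bitLength ((1 : Nat) : Int) = 1 := by decide
      rw [hbl]
      refine ⟨by simp, ?_⟩
      have hr' : r = (r.toNat : Int) := by omega
      rw [hr']
      rw [← Int.natCast_shiftRight]
      simp [Nat.shiftRight_eq_div_pow]
    · -- r even: peel one factor of two
      have hodd' : r.toNat % 2 = 0 := by omega
      set m : Int := PySem.Int.floordiv r 2 with hm
      have hm2 : m = r / 2 := by
        rw [hm, PySem.Int.floordiv_eq_ediv_of_pos (by omega : (0:Int) < 2)]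
      have hmpos : 0 < m := by rw [hm2]; omega
      have hrm : r.toNat = 2 * m.toNat := by omega
      have hmn : m.toNat ≤ n := by omega
      obtain ⟨ih1, ih2⟩ := ih m hmpos hmn
      -- lowbit of r = 2 * lowbit of m
      set lbm : Nat := m.toNat - (m.toNat &&& (m.toNat - 1)) with hlbm
      have hlbm_pos : 0 < lbm := by
        have := Nat.and_le_right (n := m.toNat) (m := m.toNat - 1)
        omega
      have hbandm : PySem.Int.band m (-m) = ((lbm : Nat) : Int) := pvBand_neg_self m hmpos
      have hbandr : PySem.Int.band r (-r) = ((2 * lbm : Nat) : Int) := by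
        rw [pvBand_neg_self r hr, hrm, pvAnd_pred_even m.toNat (by omega)]
        congr 1
        have := Nat.and_le_right (n := m.toNat) (m := m.toNat - 1)
        omega
      -- bit lengths
      have hbl : PySem.Int.bitLength ((2 * lbm : Nat) : Int)
          = PySem.Int.bitLength ((lbm : Nat) : Int) + 1 := by
        rw [PySem.Int.bitLength_natCast (by omega : 0 < 2 * lbm)]
        congr 2
        omega
      have hblm_pos : 0 < PySem.Int.bitLength ((lbm : Nat) : Int) := pvBitLength_pos lbm hlbm_pos
      set cm : Nat := PySem.Int.bitLength ((lbm : Nat) : Int) - 1 with hcm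
      have hcount_r : PySem.Int.bitLength (PySem.Int.band r (-r)) - 1 = cm + 1 := by
        rw [hbandr, hbl]; omega
      -- unfold the recursion one step
      have hmodr : PySem.Int.mod r 2 = 0 := by
        rw [PySem.Int.mod_eq_emod_of_pos (by omega : (0:Int) < 2)]
        omega
      have hrec : pvCountTwos r 0 = (1 + (pvCountTwos m 0).1, (pvCountTwos m 0).2) := by
        by_cases hr1 : r > 1
        · rw [pvCountTwos.eq_def r 0, if_pos ⟨hr1, hmodr⟩, ← hm,
              pvCountTwos_shift m.toNat m le_rfl (0 + 1)]
          simp only [Prod.mk.injEq]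
          exact ⟨by ring, trivial⟩
        · omega
      have hcnn := pvCountTwos_nonneg m.toNat m le_rfl
      constructor
      · rw [hcount_r, hrec]
        have : cm = (pvCountTwos m 0).1.toNat := by
          rw [hcm, ← hbandm]; exact ih1
        dsimp only
        omega
      · rw [hcount_r, hrec]
        have hnatshift : (2 * m.toNat) >>> (cm + 1) = m.toNat >>> cm := by
          rw [Nat.shiftRight_eq_div_pow, Nat.shiftRight_eq_div_pow, pow_succ,
              Nat.mul_comm (2 ^ cm) 2]
          exact Nat.mul_div_mul_left m.toNat (2 ^ cm) (by omega)
        have hshift : r >>> (cm + 1) = m >>> cm := by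
          have hr' : r = ((2 * m.toNat : Nat) : Int) := by omega
          have hm' : m = ((m.toNat : Nat) : Int) := by omega
          rw [hr', ← Int.natCast_shiftRight, hnatshift, Int.natCast_shiftRight, ← hm']
        rw [hshift]
        dsimp only
        rw [← ih2, hbandm]
      
-- stride builders agree on in-range axes
theorem pvMk_eq (ax : Int) (h1 : -3 ≤ ax) (h2 : ax < 3) (f : Int) :
    pvMkStride ax f = pvMkAlt (PySem.Int.mod ax 3) f := by
  interval_cases ax <;>
    simp [pvMkStride, pvMkAlt, PySem.List.pySetD, PySem.List.pySet?,
      PySem.Int.mod, PySem.List.pyRange] <;> rfl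

-- ===== VERDICT (by name: the statement is the Claim_ definitions above) =====
theorem make_strides_py_spec : Claim_equal_make_strides_py := by
  intro z ax _ hpre
  unfold Spec_make_strides_py make_strides_py make_strides_py_alt
  by_cases hz : z ≤ 1
  · rw [if_pos hz, pvLoopA.eq_def, if_neg (by omega : ¬ z > 1)]
  · rw [if_neg hz]
    have hax : -3 ≤ ax ∧ ax < 3 := by
      rcases hpre with h | h
      · omega
      · exact h
    obtain ⟨hcnt, hodd⟩ := pvClosed_eq z.toNat z (by omega) le_rfl
    rw [pvLoopA_acc ax z.toNat z le_rfl, pvEmit_eq ax z.toNat z le_rfl]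
    dsimp only
    rw [hodd, hcnt]
    simp only [List.map_append, List.map_replicate]
    rw [pvMk_eq ax hax.1 hax.2 2]
    split_ifs with h
    · rw [pvMk_eq ax hax.1 hax.2]
      simp
    · simp
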